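-- pv_equiv track=rewrite | github.com/Aaron-Reyes-Rodriguez/Brevets-Time-Calc | DockerMongo/acp_times.py | separate_distances
-- ===== SOURCE A (Python) =====
-- def separate_distances(number):
--    """
--    Args:
--       number: control distance
--    Returns:
--       A list of distances seperated in such a way that shows how much
--       distance is traveled in each brevet
--    """
--    brevets = [(0,200), (200,200), (400,200), (600,400), (1000,300)] #(brevet, distance to next brevet)
--    distances = []
--    for distance, dst_to_nxt  in brevets:
--       km_through_brevet = number - distance
--       if km_through_brevet > dst_to_nxt:
--          distances.append(dst_to_nxt)
--       else:
--          distances.append(km_through_brevet)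
--          break
--    return distances
-- ===== SOURCE B (Python) =====
-- _LOWERS = [0, 200, 400, 600, 1000]
-- _UPPERS = [200, 400, 600, 1000, 1300]
-- _FULLS = [200, 200, 200, 400, 300]
--
--
-- def separate_distances(number):
--    # number of fully completed brevet segments (uppers strictly below number)
--    k = sum(u < number for u in _UPPERS)
--    result = _FULLS[:k]
--    if k < 5:
--       result.append(number - _LOWERS[k])
--    return result
-- ===== Notes on version B (the rewrite author's own statement) =====
-- stated objective: alternative
-- what changed: Replaces the scan-with-break over (start, length) pairs by counting completed segments against an upper-boundary table, slicing the full-length table and appending the remainder past the last completed boundary.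
import Mathlib
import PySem

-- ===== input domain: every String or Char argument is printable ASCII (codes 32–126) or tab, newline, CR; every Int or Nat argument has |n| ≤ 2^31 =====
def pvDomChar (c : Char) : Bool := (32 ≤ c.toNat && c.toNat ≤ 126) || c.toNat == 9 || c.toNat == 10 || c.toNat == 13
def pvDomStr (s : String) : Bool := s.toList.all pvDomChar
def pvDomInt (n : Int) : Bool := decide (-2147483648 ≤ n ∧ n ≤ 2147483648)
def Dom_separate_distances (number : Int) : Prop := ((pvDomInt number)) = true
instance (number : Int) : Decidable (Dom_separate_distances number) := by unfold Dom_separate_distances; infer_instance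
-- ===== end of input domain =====

-- B replaces A's scan-with-break by an index computation into precomputed boundary/length tables (alternative decomposition, same cost).


-- ===== PORT A =====
-- the for-loop with break, as structural recursion over the brevets list
def sdLoopA (number : Int) : List (Int × Int) → List Int
  | [] => []
  | (distance, dst_to_nxt) :: rest =>
    let km_through_brevet := number - distance
    if km_through_brevet > dst_to_nxt then
      dst_to_nxt :: sdLoopA number rest
    else
      [km_through_brevet]

def separate_distances (number : Int) : List Int :=
  sdLoopA number [(0,200), (200,200), (400,200), (600,400), (1000,300)]

-- ===== PORT B =====
def sdLowers : List Int := [0, 200, 400, 600, 1000]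
def sdUppers : List Int := [200, 400, 600, 1000, 1300]
def sdFulls : List Int := [200, 200, 200, 400, 300]

def separate_distances_alt (number : Int) : List Int :=
  -- k = sum(u < number for u in _UPPERS)
  let k : Int := sdUppers.foldl (fun acc u => acc + if u < number then 1 else 0) 0
  let result := PySem.List.slice sdFulls none (some k)   -- _FULLS[:k]
  if k < 5 then
    result ++ [number - (PySem.List.pyGet? sdLowers k).getD 0]  -- _LOWERS[k]; guarded in range, so getD exact
  else
    result

-- ===== PRECONDITION & SPEC =====
def Spec_separate_distances (number : Int) (out : List Int) : Prop := out = separate_distances_alt number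
instance (number : Int) (out : List Int) : Decidable (Spec_separate_distances number out) := by unfold Spec_separate_distances; infer_instance

-- ===== CLAIM (what is proved, stated in full; the proofs are below) =====
def Claim_equal_separate_distances : Prop := ∀ (number : Int), Dom_separate_distances number → Spec_separate_distances number (separate_distances number)

-- ===== LEMMAS AND PROOFS =====

-- ===== VERDICT (by name: the statement is the Claim_ definition above) =====
set_option maxHeartbeats 2000000 in
theorem separate_distances_spec : Claim_equal_separate_distances := by
  intro number _
  unfold Spec_separate_distances separate_distances separate_distances_alt
  by_cases h1 : (200:Int) < number
  · by_cases h2 : (400:Int) < number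
    · by_cases h3 : (600:Int) < number
      · by_cases h4 : (1000:Int) < number
        · by_cases h5 : (1300:Int) < number
          · simp [sdLoopA, sdUppers, sdFulls, sdLowers, PySem.List.slice, PySem.List.pyGet?, PySem.List.pyIdx?, show (200:Int) < number - 0 from by omega, show (200:Int) < number from by omega, show (200:Int) < number - 200 from by omega, show (400:Int) < number from by omega, show (200:Int) < number - 400 from by omega, show (600:Int) < number from by omega, show (400:Int) < number - 600 from by omega, show (1000:Int) < number from by omega, show (300:Int) < number - 1000 from by omega, show (1300:Int) < number from by omega]
          · simp [sdLoopA, sdUppers, sdFulls, sdLowers, PySem.List.slice, PySem.List.pyGet?, PySem.List.pyIdx?, show (200:Int) < number - 0 from by omega, show (200:Int) < number from by omega, show (200:Int) < number - 200 from by omega, show (400:Int) < number from by omega, show (200:Int) < number - 400 from by omega, show (600:Int) < number from by omega, show (400:Int) < number - 600 from by omega, show (1000:Int) < number from by omega, show ¬((300:Int) < number - 1000) from by omega, show ¬((1300:Int) < number) from by omega]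
        · simp [sdLoopA, sdUppers, sdFulls, sdLowers, PySem.List.slice, PySem.List.pyGet?, PySem.List.pyIdx?, show (200:Int) < number - 0 from by omega, show (200:Int) < number from by omega, show (200:Int) < number - 200 from by omega, show (400:Int) < number from by omega, show (200:Int) < number - 400 from by omega, show (600:Int) < number from by omega, show ¬((400:Int) < number - 600) from by omega, show ¬((1000:Int) < number) from by omega, show ¬((300:Int) < number - 1000) from by omega, show ¬((1300:Int) < number) from by omega]
      · simp [sdLoopA, sdUppers, sdFulls, sdLowers, PySem.List.slice, PySem.List.pyGet?, PySem.List.pyIdx?, show (200:Int) < number - 0 from by omega, show (200:Int) < number from by omega, show (200:Int) < number - 200 from by omega, show (400:Int) < number from by omega, show ¬((200:Int) < number - 400) from by omega, show ¬((600:Int) < number) from by omega, show ¬((400:Int) < number - 600) from by omega, show ¬((1000:Int) < number) from by omega, show ¬((300:Int) < number - 1000) from by omega, show ¬((1300:Int) < number) from by omega]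
    · simp [sdLoopA, sdUppers, sdFulls, sdLowers, PySem.List.slice, PySem.List.pyGet?, PySem.List.pyIdx?, show (200:Int) < number - 0 from by omega, show (200:Int) < number from by omega, show ¬((200:Int) < number - 200) from by omega, show ¬((400:Int) < number) from by omega, show ¬((200:Int) < number - 400) from by omega, show ¬((600:Int) < number) from by omega, show ¬((400:Int) < number - 600) from by omega, show ¬((1000:Int) < number) from by omega, show ¬((300:Int) < number - 1000) from by omega, show ¬((1300:Int) < number) from by omega]
  · simp [sdLoopA, sdUppers, sdFulls, sdLowers, PySem.List.slice, PySem.List.pyGet?, PySem.List.pyIdx?, show ¬((200:Int) < number - 0) from by omega, show ¬((200:Int) < number) from by omega, show ¬((200:Int) < number - 200) from by omega, show ¬((400:Int) < number) from by omega, show ¬((200:Int) < number - 400) from by omega, show ¬((600:Int) < number) from by omega, show ¬((400:Int) < number - 600) from by omega, show ¬((1000:Int) < number) from by omega, show ¬((300:Int) < number - 1000) from by omega, show ¬((1300:Int) < number) from by omega]
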